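-- pv_equiv track=rewrite | github.com/zenghuasheng/devutils | ppm/graph.py | find_cycles_in_component
-- ===== SOURCE A (Python) =====
-- def find_cycles_in_component(graph, component):
--     visited = set()
--     rec_stack = []
--     cycle_paths = []
--
--     def dfs(node):
--         if node in rec_stack:
--             # 找到环，构建环路径
--             cycle_start_index = rec_stack.index(node)
--             cycle = rec_stack[cycle_start_index:]  # 环的节点序列
--             cycle_edges = [(cycle[i], cycle[i + 1]) for i in range(len(cycle) - 1)]  # 环的边
--             cycle_edges.append((cycle[-1], cycle[0]))  # 补上最后一条边形成环
--             cycle_paths.append(cycle_edges)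
--             return True
--         if node in visited:
--             return False
--
--         visited.add(node)
--         rec_stack.append(node)
--
--         for neighbor in graph.get(node, []):
--             if dfs(neighbor):
--                 return True
--
--         rec_stack.pop()
--         return False
--
--     for node in component:
--         if node not in visited:
--             if dfs(node):
--                 break  # 只要找到一个环就可以停止
--
--     return cycle_paths
-- ===== SOURCE B (Python) =====
-- def find_cycles_in_component(graph, component):
--     # Iterative DFS with an explicit frame stack instead of A's recursion.
--     visited = set()
--     for start in component:
--         if start in visited:
--             continue
--         visited.add(start)
--         path = [start]
--         stack = [(start, iter(graph.get(start, [])))]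
--         while stack:
--             _node, it = stack[-1]
--             nb = next(it, None)
--             if nb is None:
--                 stack.pop()
--                 path.pop()
--                 continue
--             if nb in path:
--                 i = path.index(nb)
--                 cycle = path[i:]
--                 edges = [(cycle[k], cycle[k + 1]) for k in range(len(cycle) - 1)]
--                 edges.append((cycle[-1], cycle[0]))
--                 return [edges]
--             if nb in visited:
--                 continue
--             visited.add(nb)
--             path.append(nb)
--             stack.append((nb, iter(graph.get(nb, []))))
--     return []
-- ===== Notes on version B (the rewrite author's own statement) =====
-- stated objective: alternative
-- what changed: A's recursive DFS with a shared mutable rec_stack is replaced by an iterative DFS using an explicit stack of (node, remaining-neighbours) frames and a parallel path list; the cycle is returned directly instead of being propagated through boolean returns and an outer break.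
import Mathlib
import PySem

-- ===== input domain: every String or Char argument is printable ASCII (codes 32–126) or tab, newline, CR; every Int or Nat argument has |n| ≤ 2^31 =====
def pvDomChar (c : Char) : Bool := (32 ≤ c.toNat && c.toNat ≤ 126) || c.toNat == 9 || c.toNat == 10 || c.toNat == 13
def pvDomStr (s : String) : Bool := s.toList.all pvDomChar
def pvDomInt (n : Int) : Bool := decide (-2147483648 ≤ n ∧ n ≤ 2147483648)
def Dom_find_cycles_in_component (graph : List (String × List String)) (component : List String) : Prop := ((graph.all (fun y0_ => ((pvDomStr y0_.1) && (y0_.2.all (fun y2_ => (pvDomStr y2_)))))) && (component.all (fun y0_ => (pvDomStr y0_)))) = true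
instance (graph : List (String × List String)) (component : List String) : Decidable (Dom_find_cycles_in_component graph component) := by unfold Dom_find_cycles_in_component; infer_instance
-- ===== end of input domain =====

-- B is an iterative DFS (explicit frame stack) where A recurses; equivalence of the return value is proved.
-- Both Pythons build the cycle edge list from the current path by the same expressions; this shared helper is that block.
def pvCycleEdges (rec_stack : List String) (node : String) : List (String × String) :=
  let cycle_start_index : Nat := (PySem.List.index? rec_stack node).getD 0
  let cycle := PySem.List.slice rec_stack (some (cycle_start_index : Int)) none
  let cycle_edges := (PySem.List.pyRange 0 ((cycle.length : Int) - 1) 1).map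
    (fun i => (PySem.List.pyGetD cycle i "", PySem.List.pyGetD cycle (i + 1) ""))
  cycle_edges ++ [(PySem.List.pyGetD cycle (-1) "", PySem.List.pyGetD cycle 0 "")]

-- Fuel for the ports (A's recursion depth is bounded by the number of node names, B's loop count by the
-- exponential bound used in the simulation lemmas; both are proved sufficient below).
def pvU (graph : List (String × List String)) (component : List String) : List String :=
  component ++ graph.flatMap (fun p => p.1 :: p.2)
def pvFuelA (graph : List (String × List String)) (component : List String) : Nat :=
  (pvU graph component).length + 1
def pvDeg (graph : List (String × List String)) : Nat :=
  (graph.map (fun p => p.2.length)).sum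
def pvFuelB (graph : List (String × List String)) (component : List String) : Nat :=
  (pvDeg graph + 2) ^ (pvFuelA graph component) + 1

-- ===== PORT A =====
-- A's recursive dfs: returns (found, visited, rec_stack, cycle_paths); fuel-guarded (sufficiency proved below).
mutual
def pvDfsA (graph : List (String × List String)) (f : Nat) (node : String)
    (visited : PySem.Set String) (rec_stack : List String)
    (cycle_paths : List (List (String × String))) :
    Option (Bool × PySem.Set String × List String × List (List (String × String))) :=
  match f with
  | 0 => none
  | f' + 1 =>
    if rec_stack.contains node then
      some (true, visited, rec_stack, cycle_paths ++ [pvCycleEdges rec_stack node])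
    else if PySem.Set.contains visited node then
      some (false, visited, rec_stack, cycle_paths)
    else
      pvForA graph f' (PySem.Dict.getD (PySem.Dict.mk graph) node [])
        (PySem.Set.add visited node) (rec_stack ++ [node]) cycle_paths
termination_by (f, 0)

def pvForA (graph : List (String × List String)) (f : Nat) (ns : List String)
    (visited : PySem.Set String) (rec_stack : List String)
    (cycle_paths : List (List (String × String))) :
    Option (Bool × PySem.Set String × List String × List (List (String × String))) :=
  match ns with
  | [] => some (false, visited, rec_stack.dropLast, cycle_paths)
  | nb :: rest =>
    match pvDfsA graph f nb visited rec_stack cycle_paths with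
    | none => none
    | some (true, v', rs', cp') => some (true, v', rs', cp')
    | some (false, v', rs', cp') => pvForA graph f rest v' rs' cp'
termination_by (f, ns.length + 1)
end

-- A's outer 'for node in component: if node not in visited: if dfs(node): break'
def pvMainA (graph : List (String × List String)) (fuel : Nat) (comp : List String)
    (visited : PySem.Set String) (rec_stack : List String)
    (cycle_paths : List (List (String × String))) : List (List (String × String)) :=
  match comp with
  | [] => cycle_paths
  | n :: rest =>
    if PySem.Set.contains visited n then pvMainA graph fuel rest visited rec_stack cycle_paths
    else
      match pvDfsA graph fuel n visited rec_stack cycle_paths with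
      | none => cycle_paths
      | some (true, _, _, cp') => cp'
      | some (false, v', rs', cp') => pvMainA graph fuel rest v' rs' cp'

def find_cycles_in_component (graph : List (String × List String)) (component : List String) :
    List (List (String × String)) :=
  pvMainA graph (pvFuelA graph component) component PySem.Set.empty [] []

-- ===== PORT B =====
-- Source B's while loop over the explicit frame stack: each frame is (node, remaining neighbours).
def pvLoopB (graph : List (String × List String)) (f : Nat)
    (stack : List (String × List String)) (path : List String) (visited : PySem.Set String) :
    Option (Option (List (String × String)) × PySem.Set String) :=
  match f with
  | 0 => none
  | f' + 1 =>
    match stack with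
    | [] => some (none, visited)
    | (node, ns) :: rest =>
      match ns with
      | [] => pvLoopB graph f' rest path.dropLast visited
      | nb :: ns' =>
        if path.contains nb then some (some (pvCycleEdges path nb), visited)
        else if PySem.Set.contains visited nb then pvLoopB graph f' ((node, ns') :: rest) path visited
        else
          pvLoopB graph f'
            ((nb, PySem.Dict.getD (PySem.Dict.mk graph) nb []) :: (node, ns') :: rest)
            (path ++ [nb]) (PySem.Set.add visited nb)

-- Source B's outer 'for start in component'
def pvMainB (graph : List (String × List String)) (fuel : Nat) (comp : List String)
    (visited : PySem.Set String) : List (List (String × String)) :=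
  match comp with
  | [] => []
  | start :: rest =>
    if PySem.Set.contains visited start then pvMainB graph fuel rest visited
    else
      match pvLoopB graph fuel [(start, PySem.Dict.getD (PySem.Dict.mk graph) start [])]
          [start] (PySem.Set.add visited start) with
      | none => []
      | some (some edges, _) => [edges]
      | some (none, v') => pvMainB graph fuel rest v'

def find_cycles_in_component_alt (graph : List (String × List String)) (component : List String) :
    List (List (String × String)) :=
  pvMainB graph (pvFuelB graph component) component PySem.Set.empty

-- ===== PRECONDITION & SPEC =====
def Spec_find_cycles_in_component (graph : List (String × List String)) (component : List String) (out : List (List (String × String))) : Prop := out = find_cycles_in_component_alt graph component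
instance (graph : List (String × List String)) (component : List String) (out : List (List (String × String))) : Decidable (Spec_find_cycles_in_component graph component out) := by unfold Spec_find_cycles_in_component; infer_instance

-- ===== CLAIM (what is proved, stated in full; the proofs are below) =====
def Claim_equal_find_cycles_in_component : Prop := ∀ (graph : List (String × List String)) (component : List String), Dom_find_cycles_in_component graph component → Spec_find_cycles_in_component graph component (find_cycles_in_component graph component)

-- ===== LEMMAS AND PROOFS =====

-- counting helpers for the visited-set measure
theorem pvFilterLe (p q : String → Bool) (l : List String) (h : ∀ a ∈ l, p a → q a) :
    (l.filter p).length ≤ (l.filter q).length := by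
  rw [← List.countP_eq_length_filter, ← List.countP_eq_length_filter]
  exact List.countP_mono_left h

theorem pvFilterLt (p q : String → Bool) : ∀ (l : List String) (n : String), n ∈ l →
    p n = false → q n = true → (∀ a ∈ l, p a → q a) →
    (l.filter p).length < (l.filter q).length := by
  intro l
  induction l with
  | nil => intro n hn; simp at hn
  | cons a l ih =>
    intro n hn hp hq h
    have hrest : ∀ x ∈ l, p x → q x := fun x hx => h x (List.mem_cons_of_mem _ hx)
    by_cases ha : a = n
    · subst ha
      have := pvFilterLe p q l hrest
      simp [hp, hq]; omega
    · have hn' : n ∈ l := by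
        cases hn with
        | head => exact absurd rfl ha
        | tail _ h1 => exact h1
      have hlt := ih n hn' hp hq hrest
      rcases hpa : p a with _ | _ <;> rcases hqa : q a with _ | _
      · simp [hpa, hqa]; omega
      · simp [hpa, hqa]; omega
      · exact absurd (h a List.mem_cons_self hpa) (by simp [hqa])
      · simp [hpa, hqa]; omega

-- B's loop only gains results with more fuel.
theorem pvLoopB_succ (graph : List (String × List String)) : ∀ (f : Nat),
    ∀ stack path visited r, pvLoopB graph f stack path visited = some r →
      pvLoopB graph (f + 1) stack path visited = some r := by
  intro f
  induction f with
  | zero => intro stack path visited r h; simp [pvLoopB] at h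
  | succ f ih =>
    intro stack path visited r h
    match stack with
    | [] => simpa [pvLoopB] using h
    | (node, ns) :: rest =>
      match ns with
      | [] =>
        rw [pvLoopB] at h ⊢
        exact ih _ _ _ _ h
      | nb :: ns' =>
        rw [pvLoopB] at h ⊢
        by_cases h1 : nb ∈ path <;> simp [h1] at h ⊢
        · exact h
        · by_cases h2 : nb ∈ visited <;> simp [h2] at h ⊢
          · exact ih _ _ _ _ h
          · exact ih _ _ _ _ h

theorem pvLoopB_mono (graph : List (String × List String)) {f f' : Nat} (h : f ≤ f')
    {stack : List (String × List String)} {path : List String} {visited : PySem.Set String}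
    {r : Option (List (String × String)) × PySem.Set String}
    (hr : pvLoopB graph f stack path visited = some r) :
    pvLoopB graph f' stack path visited = some r := by
  obtain ⟨d, rfl⟩ := Nat.exists_eq_add_of_le h
  clear h
  induction d with
  | zero => exact hr
  | succ d ih => exact pvLoopB_succ graph (f + d) _ _ _ _ ih

-- number of still-unvisited node names
def pvUnvis (graph : List (String × List String)) (component : List String)
    (v : PySem.Set String) : Nat :=
  ((PySem.List.dedup (pvU graph component)).filter (fun x => !(PySem.Set.contains v x))).length

theorem pvUnvis_mono (graph : List (String × List String)) (component : List String)
    {v w : PySem.Set String} (h : ∀ x, x ∈ v → x ∈ w) :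
    pvUnvis graph component w ≤ pvUnvis graph component v := by
  apply pvFilterLe
  intro a _ ha
  simp only [Bool.not_eq_true'] at ha ⊢
  rcases hav : PySem.Set.contains v a with _ | _
  · rfl
  · exact absurd (h a (by simpa using hav)) (by simp at ha; exact ha)

theorem pvUnvis_strict (graph : List (String × List String)) (component : List String)
    {v : PySem.Set String} {n : String} (hn : n ∈ pvU graph component) (hnv : n ∉ v) :
    pvUnvis graph component (PySem.Set.add v n) < pvUnvis graph component v := by
  apply pvFilterLt
  · exact (PySem.List.mem_dedup _ _).mpr hn
  · simp [PySem.Set.mem_add]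
  · simpa using hnv
  · intro a _ ha
    simp only [Bool.not_eq_true', ← Bool.not_eq_true] at ha ⊢
    intro hav
    exact ha (by simp [PySem.Set.mem_add] at hav ⊢; exact Or.inl hav)

theorem pvAdj_getD (graph : List (String × List String)) (m : String) :
    PySem.Dict.getD (PySem.Dict.mk graph) m [] = [] ∨
      (PySem.Dict.getD (PySem.Dict.mk graph) m []) ∈ graph.map (·.2) := by
  induction graph with
  | nil => left; rfl
  | cons p rest ih =>
    rw [PySem.Dict.getD_eq_get?_getD]
    obtain ⟨k, vs⟩ := p
    rw [PySem.Dict.get?_mk_cons]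
    by_cases hk : k == m
    · simp [hk]
    · rw [if_neg hk, ← PySem.Dict.getD_eq_get?_getD]
      rcases ih with h | h
      · left; exact h
      · right; simp [h]

theorem pvAdj_subset (graph : List (String × List String)) (component : List String) (m : String) :
    ∀ x ∈ PySem.Dict.getD (PySem.Dict.mk graph) m [], x ∈ pvU graph component := by
  intro x hx
  rcases pvAdj_getD graph m with h | h
  · rw [h] at hx; simp at hx
  · simp only [List.mem_map] at h
    obtain ⟨⟨k, vs⟩, hmem, hvs⟩ := h
    unfold pvU
    refine List.mem_append_right _ ?_
    refine List.mem_flatMap.mpr ⟨(k, vs), hmem, ?_⟩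
    simp only at hvs
    exact List.mem_cons_of_mem _ (by rw [hvs]; exact hx)

theorem pvAdj_len_le (graph : List (String × List String)) (m : String) :
    (PySem.Dict.getD (PySem.Dict.mk graph) m []).length ≤ pvDeg graph := by
  rcases pvAdj_getD graph m with h | h
  · rw [h]; simp
  · simp only [List.mem_map] at h
    obtain ⟨⟨k, vs⟩, hmem, hvs⟩ := h
    unfold pvDeg
    have : vs.length ∈ (graph.map (fun p => p.2.length)) := by
      refine List.mem_map.mpr ⟨(k, vs), hmem, rfl⟩
    simp only at hvs
    calc (PySem.Dict.getD (PySem.Dict.mk graph) m []).length = vs.length := by rw [← hvs]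
      _ ≤ _ := List.le_sum_of_mem this

-- A-side fuel sufficiency (with growth of visited and containment in pvU)
def pvSuffDStmt (graph : List (String × List String)) (component : List String) (f : Nat) : Prop :=
  ∀ n v p cp, n ∈ pvU graph component → (∀ x ∈ v, x ∈ pvU graph component) →
    pvUnvis graph component v < f →
    ∃ res, pvDfsA graph f n v p cp = some res ∧
      (∀ x ∈ res.2.1, x ∈ pvU graph component) ∧ (∀ x ∈ v, x ∈ res.2.1)

theorem pvSuffL_of_suffD (graph : List (String × List String)) (component : List String) (f : Nat)
    (hD : pvSuffDStmt graph component f) :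
    ∀ ns v p cp, (∀ x ∈ ns, x ∈ pvU graph component) → (∀ x ∈ v, x ∈ pvU graph component) →
      pvUnvis graph component v < f →
      ∃ res, pvForA graph f ns v p cp = some res ∧
        (∀ x ∈ res.2.1, x ∈ pvU graph component) ∧ (∀ x ∈ v, x ∈ res.2.1) := by
  intro ns
  induction ns with
  | nil =>
    intro v p cp _ hvU _
    exact ⟨(false, v, p.dropLast, cp), by rw [pvForA], hvU, fun x hx => hx⟩
  | cons nb rest ih =>
    intro v p cp hns hvU hlt
    obtain ⟨res1, h1, hU1, hg1⟩ := hD nb v p cp (hns nb List.mem_cons_self) hvU hlt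
    obtain ⟨b, v1, rs1, cp1⟩ := res1
    rcases b with _ | _
    · have hlt1 : pvUnvis graph component v1 < f :=
        lt_of_le_of_lt (pvUnvis_mono graph component hg1) hlt
      obtain ⟨res, h2, hU2, hg2⟩ :=
        ih v1 rs1 cp1 (fun x hx => hns x (List.mem_cons_of_mem _ hx)) hU1 hlt1
      refine ⟨res, ?_, hU2, fun x hx => hg2 x (hg1 x hx)⟩
      rw [pvForA, h1]
      exact h2
    · refine ⟨(true, v1, rs1, cp1), ?_, hU1, hg1⟩
      rw [pvForA, h1]

theorem pvSuffD (graph : List (String × List String)) (component : List String) :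
    ∀ f, pvSuffDStmt graph component f := by
  intro f
  induction f with
  | zero => intro n v p cp _ _ hlt; omega
  | succ f ih =>
    intro n v p cp hnU hvU hlt
    by_cases h1 : n ∈ p
    · exact ⟨(true, v, p, cp ++ [pvCycleEdges p n]), by rw [pvDfsA]; simp [h1], hvU, fun x hx => hx⟩
    · by_cases h2 : n ∈ v
      · exact ⟨(false, v, p, cp), by rw [pvDfsA]; simp [h1, h2], hvU, fun x hx => hx⟩
      · have hnv : n ∉ v := h2
        have haddU : ∀ x ∈ PySem.Set.add v n, x ∈ pvU graph component := by
          intro x hx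
          rcases (PySem.Set.mem_add _ _ _).mp hx with hx | hx
          · exact hvU x hx
          · exact hx ▸ hnU
        have hlt' : pvUnvis graph component (PySem.Set.add v n) < f := by
          have := pvUnvis_strict graph component hnU hnv
          omega
        obtain ⟨res, hres, hU, hg⟩ := pvSuffL_of_suffD graph component f ih
          (PySem.Dict.getD (PySem.Dict.mk graph) n [])
          (PySem.Set.add v n) (p ++ [n]) cp
          (pvAdj_subset graph component n) haddU hlt'
        refine ⟨res, ?_, hU, fun x hx => hg x ((PySem.Set.mem_add _ _ _).mpr (Or.inl hx))⟩
        rw [pvDfsA]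
        simp only [List.contains_eq_mem, PySem.Set.contains_eq_listContains, decide_eq_true_eq]
        rw [if_neg h1, if_neg h2]
        exact hres

-- step-count bounds used by the simulation
def pvED (graph : List (String × List String)) (f : Nat) : Nat := (pvDeg graph + 2) ^ f
def pvEL (graph : List (String × List String)) (f : Nat) (ns : List String) : Nat :=
  ns.length * (pvDeg graph + 2) ^ f + 1

-- Simulation: A's dfs/for-loop corresponds to B's frame-stack loop, with explicit fuel accounting.
def pvSimDStmt (graph : List (String × List String)) (f : Nat) : Prop :=
  ∀ n v p cp res, pvDfsA graph f n v p cp = some res →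
    ((res.1 = false ∧ res.2.2.1 = p ∧ res.2.2.2 = cp ∧
       ∀ node ns rest g r, pvLoopB graph g ((node, ns) :: rest) p res.2.1 = some r →
         pvLoopB graph (g + pvED graph f) ((node, n :: ns) :: rest) p v = some r)
     ∨ (∃ c vb, res.1 = true ∧ res.2.2.2 = cp ++ [c] ∧
       ∀ node ns rest g, pvLoopB graph (g + pvED graph f) ((node, n :: ns) :: rest) p v =
         some (some c, vb)))

def pvSimLStmt (graph : List (String × List String)) (f : Nat) : Prop :=
  ∀ ns v p cp res, pvForA graph f ns v p cp = some res →
    ((res.1 = false ∧ res.2.2.1 = p.dropLast ∧ res.2.2.2 = cp ∧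
       ∀ node rest g r, pvLoopB graph g rest p.dropLast res.2.1 = some r →
         pvLoopB graph (g + pvEL graph f ns) ((node, ns) :: rest) p v = some r)
     ∨ (∃ c vb, res.1 = true ∧ res.2.2.2 = cp ++ [c] ∧
       ∀ node rest g, pvLoopB graph (g + pvEL graph f ns) ((node, ns) :: rest) p v =
         some (some c, vb)))

theorem pvEL_cons (graph : List (String × List String)) (f : Nat) (nb : String)
    (ns : List String) (g : Nat) :
    g + pvEL graph f (nb :: ns) = (g + pvEL graph f ns) + pvED graph f := by
  simp only [pvEL, pvED, List.length_cons]
  ring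

theorem pvSimL_of_simD (graph : List (String × List String)) (f : Nat)
    (hD : pvSimDStmt graph f) : pvSimLStmt graph f := by
  intro ns
  induction ns with
  | nil =>
    intro v p cp res h
    rw [pvForA] at h
    injection h with h
    subst h
    left
    refine ⟨rfl, rfl, rfl, ?_⟩
    intro node rest g r hr
    have : g + pvEL graph f [] = g + 1 := by simp [pvEL]
    rw [this, pvLoopB]
    exact hr
  | cons nb ns' ih =>
    intro v p cp res h
    rw [pvForA] at h
    rcases hd : pvDfsA graph f nb v p cp with _ | ⟨⟨b, v1, rs1, cp1⟩⟩
    · rw [hd] at h; exact absurd h (by simp)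
    · rw [hd] at h
      rcases b with _ | _
      · -- dfs returned False: continue the for loop
        rcases hD nb v p cp _ hd with ⟨_, hrs1, hcp1, chainD⟩ | ⟨c, vb, hb, _, _⟩
        · simp only at hrs1 hcp1
          rw [hrs1, hcp1] at h
          rcases ih v1 p cp res h with ⟨hb, hp, hcp, chainL⟩ | ⟨c, vb, hb, hcp, chainR⟩
          · left
            refine ⟨hb, hp, hcp, ?_⟩
            intro node rest g r hr
            rw [pvEL_cons]
            exact chainD node ns' rest (g + pvEL graph f ns') r (chainL node rest g r hr)
          · right
            refine ⟨c, vb, hb, hcp, ?_⟩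
            intro node rest g
            rw [pvEL_cons]
            exact chainD node ns' rest (g + pvEL graph f ns') _ (chainR node rest g)
        · exact absurd hb (by simp)
      · -- dfs returned True
        injection h with h
        subst h
        rcases hD nb v p cp _ hd with ⟨hb, _, _, _⟩ | ⟨c, vb, _, hcp, chainD⟩
        · exact absurd hb (by simp)
        · right
          refine ⟨c, vb, rfl, hcp, ?_⟩
          intro node rest g
          rw [pvEL_cons]
          exact chainD node ns' rest (g + pvEL graph f ns')

theorem pvED_pos (graph : List (String × List String)) (f : Nat) : 1 ≤ pvED graph f :=
  Nat.one_le_pow _ _ (by omega)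

theorem pvEL_succ_le (graph : List (String × List String)) (f : Nat) (m : String) :
    pvEL graph f (PySem.Dict.getD (PySem.Dict.mk graph) m []) + 1 ≤ pvED graph (f + 1) := by
  have h1 := pvAdj_len_le graph m
  have h2 := pvED_pos graph f
  have h3 : (PySem.Dict.getD (PySem.Dict.mk graph) m []).length * (pvDeg graph + 2) ^ f ≤
      pvDeg graph * (pvDeg graph + 2) ^ f := Nat.mul_le_mul_right _ h1
  have h4 : pvED graph (f + 1) =
      pvDeg graph * (pvDeg graph + 2) ^ f + 2 * (pvDeg graph + 2) ^ f := by
    simp only [pvED, pow_succ]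
    ring
  simp only [pvEL, pvED] at *
  omega

theorem pvSimD (graph : List (String × List String)) : ∀ f, pvSimDStmt graph f := by
  intro f
  induction f with
  | zero => intro n v p cp res h; simp [pvDfsA] at h
  | succ f ih =>
    intro n v p cp res h
    rw [pvDfsA] at h
    simp only [List.contains_eq_mem, PySem.Set.contains_eq_listContains, decide_eq_true_eq] at h
    by_cases h1 : n ∈ p
    · rw [if_pos h1] at h
      injection h with h
      subst h
      right
      refine ⟨pvCycleEdges p n, v, rfl, rfl, ?_⟩
      intro node ns rest g
      obtain ⟨k, hk⟩ : ∃ k, g + pvED graph (f + 1) = k + 1 :=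
        ⟨g + pvED graph (f + 1) - 1, by have := pvED_pos graph (f + 1); omega⟩
      rw [hk, pvLoopB]
      simp [h1]
    · rw [if_neg h1] at h
      by_cases h2 : n ∈ v
      · rw [if_pos h2] at h
        injection h with h
        subst h
        left
        refine ⟨rfl, rfl, rfl, ?_⟩
        intro node ns rest g r hr
        obtain ⟨k, hk⟩ : ∃ k, g + pvED graph (f + 1) = k + 1 :=
          ⟨g + pvED graph (f + 1) - 1, by have := pvED_pos graph (f + 1); omega⟩
        rw [hk, pvLoopB]
        simp only [List.contains_eq_mem, PySem.Set.contains_eq_listContains, decide_eq_true_eq]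
        rw [if_neg h1, if_pos h2]
        have hpos := pvED_pos graph (f + 1)
        exact pvLoopB_mono graph (by omega) hr
      · rw [if_neg h2] at h
        have hle := pvEL_succ_le graph f n
        rcases pvSimL_of_simD graph f ih _ _ _ _ _ h with
          ⟨hb, hp, hcp, chainL⟩ | ⟨c, vb, hb, hcp, chainR⟩
        · left
          rw [List.dropLast_concat] at hp
          refine ⟨hb, hp, hcp, ?_⟩
          intro node ns rest g r hr
          have hpre : pvLoopB graph g ((node, ns) :: rest) (p ++ [n]).dropLast res.2.1 = some r := by
            rw [List.dropLast_concat]; exact hr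
          have step := chainL n ((node, ns) :: rest) g r hpre
          have hpush : pvLoopB graph
              (g + pvEL graph f (PySem.Dict.getD (PySem.Dict.mk graph) n []) + 1)
              ((node, n :: ns) :: rest) p v = some r := by
            rw [pvLoopB]
            simp only [List.contains_eq_mem, PySem.Set.contains_eq_listContains, decide_eq_true_eq]
            rw [if_neg h1, if_neg h2]
            exact step
          exact pvLoopB_mono graph (by omega) hpush
        · right
          refine ⟨c, vb, hb, hcp, ?_⟩
          intro node ns rest g
          set E := pvEL graph f (PySem.Dict.getD (PySem.Dict.mk graph) n []) with hE
          have hk : g + pvED graph (f + 1) = (g + pvED graph (f + 1) - (E + 1)) + E + 1 := by omega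
          rw [hk, pvLoopB]
          simp only [List.contains_eq_mem, PySem.Set.contains_eq_listContains, decide_eq_true_eq]
          rw [if_neg h1, if_neg h2]
          exact chainR n ((node, ns) :: rest) _

-- the outer loops agree
theorem pvMain_eq (graph : List (String × List String)) (component : List String) :
    ∀ comp v, (∀ x ∈ comp, x ∈ pvU graph component) → (∀ x ∈ v, x ∈ pvU graph component) →
      pvMainA graph (pvFuelA graph component) comp v [] [] =
      pvMainB graph (pvFuelB graph component) comp v := by
  intro comp
  induction comp with
  | nil => intro v _ _; rw [pvMainA, pvMainB]
  | cons n rest ih =>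
    intro v hcomp hvU
    have hrest : ∀ x ∈ rest, x ∈ pvU graph component :=
      fun x hx => hcomp x (List.mem_cons_of_mem _ hx)
    rw [pvMainA, pvMainB]
    simp only [List.contains_eq_mem, PySem.Set.contains_eq_listContains, decide_eq_true_eq]
    by_cases hv : n ∈ v
    · rw [if_pos hv, if_pos hv]
      exact ih v hrest hvU
    · rw [if_neg hv, if_neg hv]
      have hnU : n ∈ pvU graph component := hcomp n List.mem_cons_self
      have haddU : ∀ x ∈ PySem.Set.add v n, x ∈ pvU graph component := by
        intro x hx
        rcases (PySem.Set.mem_add _ _ _).mp hx with hx | hx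
        · exact hvU x hx
        · exact hx ▸ hnU
      have hlen : pvUnvis graph component (PySem.Set.add v n) < (pvU graph component).length := by
        have h1 := pvUnvis_strict graph component hnU hv
        have h2 : pvUnvis graph component v ≤ (PySem.List.dedup (pvU graph component)).length :=
          List.length_filter_le _ _
        have h3 : (PySem.List.dedup (pvU graph component)).length ≤ (pvU graph component).length := by
          rw [PySem.List.dedup_eq_ofList]
          exact PySem.Set.length_ofList_le _
        omega
      obtain ⟨res, hres, hU, hg⟩ := pvSuffL_of_suffD graph component
        ((pvU graph component).length) (pvSuffD graph component _)
        (PySem.Dict.getD (PySem.Dict.mk graph) n []) (PySem.Set.add v n) [n] []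
        (pvAdj_subset graph component n) haddU hlen
      obtain ⟨b, v', rs', cp'⟩ := res
      have hdfs : pvDfsA graph (pvFuelA graph component) n v [] [] = some (b, v', rs', cp') := by
        rw [show pvFuelA graph component = (pvU graph component).length + 1 from rfl, pvDfsA]
        simp only [List.contains_eq_mem, PySem.Set.contains_eq_listContains, decide_eq_true_eq]
        rw [if_neg (by simp), if_neg hv]
        exact hres
      rw [hdfs]
      have hEL := pvEL_succ_le graph ((pvU graph component).length) n
      have hfb : pvFuelB graph component =
          pvED graph ((pvU graph component).length + 1) + 1 := rfl
      rcases pvSimL_of_simD graph _ (pvSimD graph _) _ _ _ _ _ hres with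
        ⟨hb, hp, hcp, chain⟩ | ⟨c, vb, hb, hcp, chain⟩
      · simp only at hb hp hcp
        subst hb; subst hp; subst hcp
        have hb1 : pvLoopB graph (1 + pvEL graph ((pvU graph component).length)
              (PySem.Dict.getD (PySem.Dict.mk graph) n []))
            [(n, PySem.Dict.getD (PySem.Dict.mk graph) n [])] [n] (PySem.Set.add v n) =
            some (none, v') := by
          have hpre : pvLoopB graph 1 [] ([n].dropLast) v' = some (none, v') := by
            rw [pvLoopB]
          exact chain n [] 1 (none, v') hpre
        have hb2 : pvLoopB graph (pvFuelB graph component)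
            [(n, PySem.Dict.getD (PySem.Dict.mk graph) n [])] [n] (PySem.Set.add v n) =
            some (none, v') := pvLoopB_mono graph (by rw [hfb]; omega) hb1
        rw [hb2]
        exact ih v' hrest hU
      · simp only at hb hcp
        subst hb; subst hcp
        have hb1 := chain n [] (pvFuelB graph component -
          pvEL graph ((pvU graph component).length) (PySem.Dict.getD (PySem.Dict.mk graph) n []))
        have heq : pvFuelB graph component -
            pvEL graph ((pvU graph component).length) (PySem.Dict.getD (PySem.Dict.mk graph) n []) +
            pvEL graph ((pvU graph component).length) (PySem.Dict.getD (PySem.Dict.mk graph) n []) =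
            pvFuelB graph component := by rw [hfb]; omega
        rw [heq] at hb1
        rw [hb1]
        simp

-- ===== VERDICT (by name: the statement is the Claim_ definition above) =====
theorem find_cycles_in_component_spec : Claim_equal_find_cycles_in_component := by
  intro graph component _
  unfold Spec_find_cycles_in_component find_cycles_in_component find_cycles_in_component_alt
  apply pvMain_eq graph component component PySem.Set.empty
  · intro x hx; unfold pvU; exact List.mem_append_left _ hx
  · intro x hx; simp [PySem.Set.empty] at hx
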